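-- pv_equiv track=rewrite | github.com/sebor13/user-data-processor | utils.py | process_users
-- ===== SOURCE A (Python) =====
-- def validate_name(name):
--     if len(name) < 2 or not name.isalpha():
--         return False
--     return True
--
-- def validate_age(age):
--     try:
--         age = int(age)
--         if age < 0 or age > 120:
--             return False, None
--         return True, age
--     except ValueError:
--         return False, None
--
-- def process_users(data):
--     valid_users = []
--     invalid_users = []
--     underage_users = []
--     adult_users = []
--     seen = []
--
--     stats = {
--         "total": 0,
--         "valid": 0,
--         "invalid": 0,
--         "underage": 0,
--         "adult": 0
--     }
--
--     for user in data:
--         user = user.strip()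
--         stats["total"] += 1
--
--         if not user:
--             invalid_users.append(user)
--             stats["invalid"] += 1
--             continue
--
--         if ":" not in user:
--             invalid_users.append(user)
--             stats["invalid"] += 1
--             continue
--
--         name, age = user.split(":")
--         name = name.capitalize()
--
--         is_valid = True
--
--         if not validate_name(name):
--             is_valid = False
--
--         is_valid_age, age = validate_age(age)
--
--         if not is_valid_age:
--             is_valid = False
--
--         if is_valid:
--             key = (name, age)
--
--             if key in seen:
--                 invalid_users.append(user)
--                 stats["invalid"] += 1
--             else:
--                 valid_users.append(f"{name} ({age})")
--                 seen.append(key)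
--                 stats["valid"] += 1
--
--                 if age < 18:
--                     underage_users.append(f"{name} ({age})")
--                     stats["underage"] += 1
--                 else:
--                     adult_users.append(f"{name} ({age})")
--                     stats["adult"] += 1
--         else:
--             invalid_users.append(user)
--             stats["invalid"] += 1
--
--     return valid_users, invalid_users, underage_users, adult_users, stats
-- ===== SOURCE B (Python) =====
-- def process_users(data):
--     def parse(user):
--         u = user.strip()
--         if u and ":" in u:
--             name, age = u.split(":")
--             name = name.capitalize()
--             try:
--                 v = int(age)
--             except ValueError:
--                 return u, None
--             if len(name) >= 2 and name.isalpha() and 0 <= v <= 120: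
--                 return u, (name, v)
--         return u, None
--
--     recs = [parse(user) for user in data]
--
--     # first-occurrence index of each candidate key; dedup becomes an index
--     # computation instead of a running seen-set
--     first = {}
--     for i, (_, key) in enumerate(recs):
--         if key is not None and key not in first:
--             first[key] = i
--
--     keep = [key for i, (_, key) in enumerate(recs)
--             if key is not None and first[key] == i]
--     invalid = [u for i, (u, key) in enumerate(recs)
--                if key is None or first[key] != i]
--     valid = [f"{name} ({age})" for name, age in keep]
--     under = [f"{name} ({age})" for name, age in keep if age < 18]
--     adult = [f"{name} ({age})" for name, age in keep if age >= 18]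
--     stats = {"total": len(recs), "valid": len(valid), "invalid": len(invalid),
--              "underage": len(under), "adult": len(adult)}
--     return valid, invalid, under, adult, stats
-- ===== Notes on version B (the rewrite author's own statement) =====
-- stated objective: alternative
-- what changed: A's single stateful loop (running seen-list, running stats counters, interleaved appends) is replaced by a stateless pipeline: parse every line to a record, compute a first-occurrence-index map so deduplication becomes 'keep iff first[key] == i' instead of a running seen-set, derive each of the five outputs by an independent comprehension over the records/kept keys, and read stats off the output lengths.
import Mathlib
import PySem

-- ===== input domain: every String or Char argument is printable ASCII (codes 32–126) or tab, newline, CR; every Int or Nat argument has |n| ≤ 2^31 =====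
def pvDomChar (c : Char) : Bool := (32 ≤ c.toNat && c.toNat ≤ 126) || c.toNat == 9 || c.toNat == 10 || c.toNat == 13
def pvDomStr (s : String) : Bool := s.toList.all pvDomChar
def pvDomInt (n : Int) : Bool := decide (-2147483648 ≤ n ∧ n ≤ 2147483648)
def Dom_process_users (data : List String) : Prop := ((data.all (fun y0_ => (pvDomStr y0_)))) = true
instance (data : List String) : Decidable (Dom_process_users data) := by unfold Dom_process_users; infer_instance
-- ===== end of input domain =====

-- B replaces A's single stateful loop (running seen-list + running stats counters) by a stateless
-- pipeline: parse each line to a record, a first-occurrence-index map for dedup, independent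
-- comprehensions for each output, stats from output lengths; equivalence is about return values.

-- Python str.capitalize(): first char uppercased, rest lowercased — exact on the ASCII domain (shared builtin model)
def pyCapitalize (s : String) : String :=
  match s.toList with
  | [] => ""
  | c :: rest => String.ofList (PySem.Chars.upperChar c :: PySem.Chars.lower rest)

-- ===== PORT A =====
def validate_name (name : String) : Bool :=
  if PySem.Str.len name < 2 || !(PySem.Str.strIsalpha name) then false else true

def validate_age (age : String) : Bool × Option Int :=
  match PySem.Int.ofStr? age with
  | none => (false, none)          -- except ValueError
  | some a => if a < 0 || a > 120 then (false, none) else (true, some a)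

-- A's for-loop; state: valid, invalid, underage, adult, seen, stats
def pvLoopA (l : List String) (v i u ad : List String) (seen : List (String × Int))
    (stats : PySem.Dict String Int) :
    List String × List String × List String × List String × (List (String × Int)) :=
  match l with
  | [] => (v, i, u, ad, stats.items)
  | user :: rest =>
    let usr := PySem.Str.strip user
    let stats := stats.modify "total" 0 (· + 1)
    if usr = "" then
      pvLoopA rest v (i ++ [usr]) u ad seen (stats.modify "invalid" 0 (· + 1))
    else if PySem.Str.isIn ":" usr = true then
      match PySem.Str.split? usr ":" with
      | some [n, a] =>
        let name := pyCapitalize n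
        let p := validate_age a
        if validate_name name && p.1 then
          let ag := p.2.getD 0      -- p.1 = true guarantees p.2 = some ag
          let key := (name, ag)
          if seen.contains key then
            pvLoopA rest v (i ++ [usr]) u ad seen (stats.modify "invalid" 0 (· + 1))
          else
            let lbl := name ++ " (" ++ PySem.Int.toStr ag ++ ")"
            if ag < 18 then
              pvLoopA rest (v ++ [lbl]) i (u ++ [lbl]) ad (seen ++ [key])
                ((stats.modify "valid" 0 (· + 1)).modify "underage" 0 (· + 1))
            else
              pvLoopA rest (v ++ [lbl]) i u (ad ++ [lbl]) (seen ++ [key])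
                ((stats.modify "valid" 0 (· + 1)).modify "adult" 0 (· + 1))
        else
          pvLoopA rest v (i ++ [usr]) u ad seen (stats.modify "invalid" 0 (· + 1))
      | _ => ([], [], [], [], [])   -- Python raises ValueError here (unpacking ≠ 2 parts); excluded by Pre_
    else
      pvLoopA rest v (i ++ [usr]) u ad seen (stats.modify "invalid" 0 (· + 1))

def process_users (data : List String) :
    List String × List String × List String × List String × (List (String × Int)) :=
  pvLoopA data [] [] [] [] []
    (PySem.Dict.ofList [("total", 0), ("valid", 0), ("invalid", 0), ("underage", 0), ("adult", 0)])

-- ===== PORT B =====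
-- B's parse(user): strip, split, capitalize, int-convert, validate → record or None
def pvParse (user : String) : String × Option (String × Int) :=
  let u := PySem.Str.strip user
  if u = "" then (u, none)
  else if PySem.Str.isIn ":" u = true then
    match PySem.Str.split? u ":" with
    | some [n, a] =>
      let name := pyCapitalize n
      match PySem.Int.ofStr? a with
      | none => (u, none)                     -- except ValueError → (u, None)
      | some v =>
        if 2 ≤ PySem.Str.len name && PySem.Str.strIsalpha name && (0 ≤ v && v ≤ 120) then
          (u, some (name, v))
        else (u, none)
    | _ => (u, none)                          -- Python raises ValueError here; excluded by Pre_
  else (u, none)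

-- one step of B's first-occurrence-index loop: record index p.1 for an unseen candidate key
def pvStep (d : PySem.Dict (String × Int) Int) (p : Int × (String × Option (String × Int))) :
    PySem.Dict (String × Int) Int :=
  match p.2.2 with
  | some k => if d.contains k then d else d.insert k p.1
  | none => d

-- B's loop building the first-occurrence-index map
def pvFirst (recs : List (String × Option (String × Int))) : PySem.Dict (String × Int) Int :=
  (PySem.List.enumerate recs).foldl pvStep PySem.Dict.empty

-- comprehension bodies of B's keep / invalid lists
def pvKeepSel (first : PySem.Dict (String × Int) Int)
    (p : Int × (String × Option (String × Int))) : Option (String × Int) :=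
  match p.2.2 with
  | some k => if first.get? k = some p.1 then some k else none
  | none => none

def pvInvSel (first : PySem.Dict (String × Int) Int)
    (p : Int × (String × Option (String × Int))) : Option String :=
  match p.2.2 with
  | some k => if first.get? k = some p.1 then none else some p.2.1
  | none => some p.2.1

def pvLabel (k : String × Int) : String := k.1 ++ " (" ++ PySem.Int.toStr k.2 ++ ")"

def process_users_alt (data : List String) :
    List String × List String × List String × List String × (List (String × Int)) :=
  let recs := data.map pvParse
  let first := pvFirst recs
  let keep := (PySem.List.enumerate recs).filterMap (pvKeepSel first)
  let invalid := (PySem.List.enumerate recs).filterMap (pvInvSel first)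
  let valid := keep.map pvLabel
  let under := (keep.filter (fun k => k.2 < 18)).map pvLabel
  let adult := (keep.filter (fun k => 18 ≤ k.2)).map pvLabel
  (valid, invalid, under, adult,
    [("total", (recs.length : Int)), ("valid", (valid.length : Int)),
     ("invalid", (invalid.length : Int)), ("underage", (under.length : Int)),
     ("adult", (adult.length : Int))])

-- ===== PRECONDITION & SPEC =====
-- Pre_ excludes exactly the inputs on which A raises an uncaught ValueError: a stripped line that
-- contains ':' but splits into more than two parts (two or more colons).
def Pre_process_users (data : List String) : Prop :=
  ∀ user ∈ data, PySem.Str.isIn ":" (PySem.Str.strip user) = true →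
    (PySem.Str.split? (PySem.Str.strip user) ":") = some
      [(PySem.Str.split? (PySem.Str.strip user) ":").getD [] |>.headI,
       ((PySem.Str.split? (PySem.Str.strip user) ":").getD []).tail.headI]
instance (data : List String) : Decidable (Pre_process_users data) := by
  unfold Pre_process_users; infer_instance

def pvWitness_process_users : List String :=
  ["alice:30", " bOb:5 ", "", "alice:30", "x:1", "no colon", "dan:abc", "eve:200"]

def Spec_process_users (data : List String)
    (out : List String × List String × List String × List String × (List (String × Int))) : Prop :=
  out = process_users_alt data
instance (data : List String)
    (out : List String × List String × List String × List String × (List (String × Int))) :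
    Decidable (Spec_process_users data out) := by unfold Spec_process_users; infer_instance

-- ===== CLAIM (what is proved, stated in full; the proofs are below) =====
def Claim_equal_process_users : Prop :=
  ∀ (data : List String), Dom_process_users data → Pre_process_users data →
    Spec_process_users data (process_users data)

-- ===== LEMMAS AND PROOFS =====

-- reference routing: first components = kept keys in order, second = invalid lines, given keys
-- already seen S; both programs are reduced to this
def specRoute (S : List (String × Int)) :
    List (String × Option (String × Int)) → List (String × Int) × List String
  | [] => ([], [])
  | (u, none) :: rest => let r := specRoute S rest; (r.1, u :: r.2)
  | (u, some k) :: rest =>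
      if S.contains k then let r := specRoute S rest; (r.1, u :: r.2)
      else let r := specRoute (S ++ [k]) rest; (k :: r.1, r.2)

-- the shape A's stats dict keeps throughout the loop
def pvMk (t a b c d : Int) : PySem.Dict String Int :=
  PySem.Dict.ofList [("total", t), ("valid", a), ("invalid", b), ("underage", c), ("adult", d)]

theorem pvMk_total (t a b c d : Int) : (pvMk t a b c d).modify "total" 0 (· + 1) = pvMk (t + 1) a b c d := rfl
theorem pvMk_valid (t a b c d : Int) : (pvMk t a b c d).modify "valid" 0 (· + 1) = pvMk t (a + 1) b c d := rfl
theorem pvMk_invalid (t a b c d : Int) : (pvMk t a b c d).modify "invalid" 0 (· + 1) = pvMk t a (b + 1) c d := rfl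
theorem pvMk_under (t a b c d : Int) : (pvMk t a b c d).modify "underage" 0 (· + 1) = pvMk t a b (c + 1) d := rfl
theorem pvMk_adult (t a b c d : Int) : (pvMk t a b c d).modify "adult" 0 (· + 1) = pvMk t a b c (d + 1) := rfl

theorem validate_name_eq (name : String) :
    validate_name name = (2 ≤ PySem.Str.len name && PySem.Str.strIsalpha name) := by
  unfold validate_name
  rcases lt_or_ge (PySem.Str.len name) 2 with h | h <;>
    cases ha : PySem.Str.strIsalpha name <;> simp_all <;> omega

theorem pvStep_preserve (l : List (Int × (String × Option (String × Int))))
    (d : PySem.Dict (String × Int) Int) (k : String × Int) (j : Int)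
    (h : d.get? k = some j) :
    (l.foldl pvStep d).get? k = some j := by
  induction l generalizing d with
  | nil => exact h
  | cons p rest ih =>
    simp only [List.foldl_cons]
    apply ih
    cases hrec : p.2.2 with
    | none => simpa [pvStep, hrec] using h
    | some k' =>
      simp only [pvStep, hrec]
      by_cases hc : d.contains k' = true
      · simp [hc, h]
      · have hc' : d.contains k' = false := by revert hc; cases d.contains k' <;> simp
        have hk : k ≠ k' := by
          rintro rfl
          rw [PySem.Dict.contains_eq_isSome_get?, h] at hc'
          simp at hc'
        simp only [hc', Bool.false_eq_true, reduceIte]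
        rw [PySem.Dict.get?_insert_of_ne _ _ hk]
        exact h

-- B's first-occurrence filter, generalized over the already-processed prefix
theorem pvRoute_first_gen (recs : List (String × Option (String × Int))) :
    ∀ (n : Int) (d : PySem.Dict (String × Int) Int) (S : List (String × Int)),
      (∀ k, d.contains k = S.contains k) →
      (∀ k j, d.get? k = some j → j < n) →
      ((PySem.List.enumerate recs n).filterMap (pvKeepSel ((PySem.List.enumerate recs n).foldl pvStep d)),
        (PySem.List.enumerate recs n).filterMap (pvInvSel ((PySem.List.enumerate recs n).foldl pvStep d)))
        = specRoute S recs := by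
  induction recs with
  | nil => intro n d S _ _; simp [PySem.List.enumerate_nil, specRoute]
  | cons r rest ih =>
    intro n d S hcon hlt
    obtain ⟨u, rec⟩ := r
    rw [PySem.List.enumerate_cons]
    cases rec with
    | none =>
      have hstep : pvStep d (n, (u, none)) = d := rfl
      have hk1 : ∀ F, pvKeepSel F (n, (u, (none : Option (String × Int)))) = none := fun _ => rfl
      have hk2 : ∀ F, pvInvSel F (n, (u, (none : Option (String × Int)))) = some u := fun _ => rfl
      simp only [List.foldl_cons, List.filterMap_cons, hstep, hk1, hk2]
      have := ih (n + 1) d S hcon (fun k j hj => lt_trans (hlt k j hj) (by omega))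
      simp only [specRoute]
      rw [← this]
    | some k =>
      by_cases hc : d.contains k = true
      · -- already seen: dict unchanged, entry stays < n, head routed invalid
        have hS : S.contains k = true := by rw [← hcon]; exact hc
        have hstep : pvStep d (n, (u, some k)) = d := by simp [pvStep, hc]
        obtain ⟨j, hj⟩ : ∃ j, d.get? k = some j := by
          rw [PySem.Dict.contains_eq_isSome_get?] at hc
          cases h : d.get? k with
          | none => rw [h] at hc; simp at hc
          | some j => exact ⟨j, rfl⟩
        have hjn : j < n := hlt k j hj
        have hget : ((PySem.List.enumerate rest (n + 1)).foldl pvStep d).get? k = some j :=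
          pvStep_preserve _ d k j hj
        have hne : ((PySem.List.enumerate rest (n + 1)).foldl pvStep d).get? k ≠ some n := by
          rw [hget]; intro h; injection h with h; omega
        have hk1 : pvKeepSel ((PySem.List.enumerate rest (n + 1)).foldl pvStep d) (n, (u, some k))
            = none := by simp [pvKeepSel, hne]
        have hk2 : pvInvSel ((PySem.List.enumerate rest (n + 1)).foldl pvStep d) (n, (u, some k))
            = some u := by simp [pvInvSel, hne]
        simp only [List.foldl_cons, List.filterMap_cons, hstep, hk1, hk2]
        have := ih (n + 1) d S hcon (fun k j hj => lt_trans (hlt k j hj) (by omega))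
        simp only [specRoute, hS, if_true]
        rw [← this]
      · -- first occurrence: insert at index n, head kept
        have hc' : d.contains k = false := by revert hc; cases d.contains k <;> simp
        have hS : S.contains k = false := by rw [← hcon]; exact hc'
        have hstep : pvStep d (n, (u, some k)) = d.insert k n := by simp [pvStep, hc']
        have hget : ((PySem.List.enumerate rest (n + 1)).foldl pvStep (d.insert k n)).get? k = some n :=
          pvStep_preserve _ _ k n (PySem.Dict.get?_insert_self d k n)
        have hk1 : pvKeepSel ((PySem.List.enumerate rest (n + 1)).foldl pvStep (d.insert k n))
            (n, (u, some k)) = some k := by simp [pvKeepSel, hget]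
        have hk2 : pvInvSel ((PySem.List.enumerate rest (n + 1)).foldl pvStep (d.insert k n))
            (n, (u, some k)) = none := by simp [pvInvSel, hget]
        simp only [List.foldl_cons, List.filterMap_cons, hstep, hk1, hk2]
        have hcon' : ∀ k', (d.insert k n).contains k' = (S ++ [k]).contains k' := by
          intro k'
          rw [PySem.Dict.contains_insert]
          simp only [List.contains_append, hcon k', List.contains_cons, List.contains_nil,
            Bool.or_false]
          exact Bool.or_comm _ _
        have hlt' : ∀ k' j, (d.insert k n).get? k' = some j → j < n + 1 := by
          intro k' j hj
          rw [PySem.Dict.get?_insert] at hj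
          split_ifs at hj with hk
          · injection hj with hj; omega
          · have := hlt k' j hj; omega
        have := ih (n + 1) (d.insert k n) (S ++ [k]) hcon' hlt'
        simp only [specRoute, hS, Bool.false_eq_true, if_false]
        rw [← this]

-- A's loop computes specRoute (plus the carried prefixes and counters)
theorem pvLoopA_eq_specRoute (data : List String) :
    ∀ (v i u ad : List String) (seen : List (String × Int)) (t a b c d : Int),
      (∀ user ∈ data, PySem.Str.isIn ":" (PySem.Str.strip user) = true →
        (PySem.Str.split? (PySem.Str.strip user) ":") = some
          [(PySem.Str.split? (PySem.Str.strip user) ":").getD [] |>.headI,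
           ((PySem.Str.split? (PySem.Str.strip user) ":").getD []).tail.headI]) →
      pvLoopA data v i u ad seen (pvMk t a b c d)
        = (v ++ (specRoute seen (data.map pvParse)).1.map pvLabel,
           i ++ (specRoute seen (data.map pvParse)).2,
           u ++ ((specRoute seen (data.map pvParse)).1.filter (fun k => k.2 < 18)).map pvLabel,
           ad ++ ((specRoute seen (data.map pvParse)).1.filter (fun k => !(k.2 < 18))).map pvLabel,
           [("total", t + data.length),
            ("valid", a + (specRoute seen (data.map pvParse)).1.length),
            ("invalid", b + (specRoute seen (data.map pvParse)).2.length),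
            ("underage", c + ((specRoute seen (data.map pvParse)).1.filter (fun k => k.2 < 18)).length),
            ("adult", d + ((specRoute seen (data.map pvParse)).1.filter (fun k => !(k.2 < 18))).length)]) := by
  induction data with
  | nil =>
    intro v i u ad seen t a b c d _
    have hitems : (pvMk t a b c d).items
        = [("total", t), ("valid", a), ("invalid", b), ("underage", c), ("adult", d)] := rfl
    simp [pvLoopA, specRoute, hitems]
  | cons user rest ih =>
    intro v i u ad seen t a b c d hpre
    have hpre' : ∀ x ∈ rest, PySem.Str.isIn ":" (PySem.Str.strip x) = true →
        (PySem.Str.split? (PySem.Str.strip x) ":") = some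
          [(PySem.Str.split? (PySem.Str.strip x) ":").getD [] |>.headI,
           ((PySem.Str.split? (PySem.Str.strip x) ":").getD []).tail.headI] :=
      fun x hx => hpre x (List.mem_cons_of_mem _ hx)
    simp only [pvLoopA, pvParse, List.map_cons]
    rw [pvMk_total]
    by_cases h0 : PySem.Str.strip user = ""
    · rw [pvMk_invalid, ih _ _ _ _ _ _ _ _ _ _ hpre']
      simp only [h0, if_true, specRoute, List.append_assoc, List.singleton_append,
        List.length_cons, Prod.mk.injEq, List.cons.injEq, and_true, true_and]
      and_intros <;> first | rfl | (push_cast; omega)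
    · by_cases hcl : PySem.Str.isIn ":" (PySem.Str.strip user) = true
      · have hsp := hpre user (List.mem_cons_self) hcl
        simp only [h0, hcl, if_false, if_true]
        rw [hsp]
        generalize ((PySem.Str.split? (PySem.Str.strip user) ":").getD []).tail.headI = astr
        generalize ((PySem.Str.split? (PySem.Str.strip user) ":").getD []).headI = nstr
        simp only []
        cases hI : PySem.Int.ofStr? astr with
        | none =>
          simp only [validate_age, hI, Bool.and_false, Bool.false_eq_true, reduceIte]
          rw [pvMk_invalid, ih _ _ _ _ _ _ _ _ _ _ hpre']
          simp only [specRoute, List.append_assoc, List.singleton_append, List.length_cons,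
            Prod.mk.injEq, List.cons.injEq, and_true, true_and]
          and_intros <;> first | rfl | (push_cast; omega)
        | some x =>
          simp only [validate_age, hI]
          by_cases hx : x < 0 ∨ x > 120
          · have hx1 : (decide (x < 0) || decide (x > 120)) = true := by
              simp only [Bool.or_eq_true, decide_eq_true_eq]; omega
            have hx2 : (decide (0 ≤ x) && decide (x ≤ 120)) = false := by
              simp only [Bool.and_eq_false_iff, decide_eq_false_iff_not]; omega
            simp only [hx1, hx2, if_true, Bool.and_false, Bool.false_eq_true, reduceIte]
            rw [pvMk_invalid, ih _ _ _ _ _ _ _ _ _ _ hpre']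
            simp only [specRoute, List.append_assoc, List.singleton_append, List.length_cons,
              Prod.mk.injEq, List.cons.injEq, and_true, true_and]
            and_intros <;> first | rfl | (push_cast; omega)
          · have hx1 : (decide (x < 0) || decide (x > 120)) = false := by
              simp only [Bool.or_eq_false_iff, decide_eq_false_iff_not]; omega
            have hx2 : (decide (0 ≤ x) && decide (x ≤ 120)) = true := by
              simp only [Bool.and_eq_true, decide_eq_true_eq]; omega
            simp only [hx1, hx2, Bool.false_eq_true, reduceIte, Bool.and_true, Option.getD_some]
            rw [validate_name_eq]
            by_cases hn : (2 ≤ PySem.Str.len (pyCapitalize nstr) &&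
                PySem.Str.strIsalpha (pyCapitalize nstr)) = true
            · simp only [hn, reduceIte]
              cases hseen : seen.contains (pyCapitalize nstr, x) with
              | true =>
                simp only [specRoute, hseen, reduceIte]
                rw [pvMk_invalid, ih _ _ _ _ _ _ _ _ _ _ hpre']
                simp only [hseen, List.append_assoc, List.singleton_append,
                  List.length_cons, Prod.mk.injEq, List.cons.injEq, and_true, true_and]
                and_intros <;> first | rfl | (push_cast; omega)
              | false =>
                simp only [specRoute, hseen, Bool.false_eq_true, reduceIte]
                by_cases h18 : x < 18
                · have h18d : decide ((pyCapitalize nstr, x).2 < 18) = true := by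
                    simp only [decide_eq_true_eq]; exact h18
                  simp only [h18, reduceIte]
                  rw [pvMk_valid, pvMk_under, ih _ _ _ _ _ _ _ _ _ _ hpre']
                  simp only [List.filter_cons, h18d, reduceIte, List.map_cons, List.length_cons,
                    List.append_assoc, List.singleton_append, Prod.mk.injEq, List.cons.injEq,
                    and_true, true_and, pvLabel, Bool.not_true, Bool.false_eq_true]
                  and_intros <;> first | rfl | (push_cast; omega)
                · have h18d : decide ((pyCapitalize nstr, x).2 < 18) = false := by
                    simp only [decide_eq_false_iff_not]; exact h18
                  simp only [h18, reduceIte]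
                  rw [pvMk_valid, pvMk_adult, ih _ _ _ _ _ _ _ _ _ _ hpre']
                  simp only [List.filter_cons, h18d, reduceIte, List.map_cons, List.length_cons,
                    List.append_assoc, List.singleton_append, Prod.mk.injEq, List.cons.injEq,
                    and_true, true_and, pvLabel, Bool.not_false, Bool.false_eq_true]
                  and_intros <;> first | rfl | (push_cast; omega)
            · have hn' : (2 ≤ PySem.Str.len (pyCapitalize nstr) &&
                  PySem.Str.strIsalpha (pyCapitalize nstr)) = false := by
                revert hn; cases (2 ≤ PySem.Str.len (pyCapitalize nstr) &&
                  PySem.Str.strIsalpha (pyCapitalize nstr)) <;> simp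
              simp only [hn', Bool.false_and, Bool.false_eq_true, reduceIte]
              rw [pvMk_invalid, ih _ _ _ _ _ _ _ _ _ _ hpre']
              simp only [specRoute, List.append_assoc, List.singleton_append, List.length_cons,
                Prod.mk.injEq, List.cons.injEq, and_true, true_and]
              and_intros <;> first | rfl | (push_cast; omega)
      · simp only [h0, hcl, if_false, Bool.false_eq_true, reduceIte]
        rw [pvMk_invalid, ih _ _ _ _ _ _ _ _ _ _ hpre']
        simp only [specRoute, List.append_assoc, List.singleton_append, List.length_cons,
          Prod.mk.injEq, List.cons.injEq, and_true, true_and]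
        and_intros <;> first | rfl | (push_cast; omega)

theorem pvFilter_adult (K : List (String × Int)) :
    K.filter (fun k => !(k.2 < 18)) = K.filter (fun k => 18 ≤ k.2) := by
  apply List.filter_congr
  intro k _
  by_cases h : k.2 < 18
  · have h' : ¬ (18 ≤ k.2) := by omega
    simp [h, h']
  · have h' : 18 ≤ k.2 := by omega
    simp [h, h']

theorem process_users_spec : Claim_equal_process_users := by
  unfold Claim_equal_process_users
  intro data _ hpre
  unfold Spec_process_users Pre_process_users at *
  unfold process_users
  have hdict : PySem.Dict.ofList
      [("total", (0:Int)), ("valid", 0), ("invalid", 0), ("underage", 0), ("adult", 0)]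
      = pvMk 0 0 0 0 0 := rfl
  rw [hdict, pvLoopA_eq_specRoute data [] [] [] [] [] 0 0 0 0 0 hpre]
  have hB := pvRoute_first_gen (data.map pvParse) 0 PySem.Dict.empty []
    (by intro k; simp [PySem.Dict.contains_empty])
    (by intro k j hj; simp [PySem.Dict.get?_empty] at hj)
  have h1 := congrArg Prod.fst hB
  have h2 := congrArg Prod.snd hB
  simp only [] at h1 h2
  simp only [process_users_alt, pvFirst]
  rw [h1, h2, pvFilter_adult]
  simp only [List.nil_append, List.length_map, zero_add]
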